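-- pv_equiv track=rewrite | github.com/NoisNette/Codesignal-solutions | boxPiles.py | boxPiles
-- ===== SOURCE A (Python) =====
-- def boxPiles(a):
--     a = sorted(a)
--     used = [False for j in range(len(a))]
--     used_num = 0
--     ans = 0
--     while used_num < len(used):
--         height = 0
--         for i in range(len(a)):
--             if a[i] >= height and not used[i]:
--                 height += 1
--                 used[i] = True
--                 used_num += 1
--         ans += 1
--     return ans
-- ===== SOURCE B (Python) =====
-- def _bound(s):
--     # s sorted ascending, all values >= 0: minimum number of piles equals
--     # max over positions i of ceil((i+1)/(s[i]+1)).
--     return max(((i + v + 1) // (v + 1) for i, v in enumerate(s)), default=0)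
--
--
-- def boxPiles(a):
--     return _bound(sorted(a))
-- ===== Notes on version B (the rewrite author's own statement) =====
-- stated objective: alternative
-- what changed: Replaces A's repeated greedy passes over a used-array (one pass per pile) by a closed form: after sorting, the answer is the maximum over positions i of ceil((i+1)/(a_sorted[i]+1)), computed in one enumeration; intended as asymptotically faster (O(n log n) vs O(n^2)) but a timing run could not confirm a ratio, so no speed is claimed.
import Mathlib
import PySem

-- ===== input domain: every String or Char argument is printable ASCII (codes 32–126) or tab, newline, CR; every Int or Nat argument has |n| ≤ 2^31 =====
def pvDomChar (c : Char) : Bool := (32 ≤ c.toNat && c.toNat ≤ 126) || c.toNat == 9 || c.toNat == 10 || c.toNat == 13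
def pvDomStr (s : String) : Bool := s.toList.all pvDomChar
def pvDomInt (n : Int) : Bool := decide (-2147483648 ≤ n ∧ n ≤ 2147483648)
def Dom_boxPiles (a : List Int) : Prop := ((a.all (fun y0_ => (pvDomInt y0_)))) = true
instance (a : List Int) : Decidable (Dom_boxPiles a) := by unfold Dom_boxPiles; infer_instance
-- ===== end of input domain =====

-- B replaces A's pass-per-pile greedy simulation by the sorted closed form
-- max_i ceil((i+1)/(a_sorted[i]+1)); equivalence is proved on lists of nonnegative
-- values (on a list with a negative value A's while loop never terminates).

-- ===== PORT A =====
-- one step of the inner 'for i in range(len(a))' loop; state = (height, used, used_num)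
def stepA (s : List Int) (st : Int × List Bool × Int) (i : Nat) : Int × List Bool × Int :=
  if s.getD i 0 ≥ st.1 ∧ st.2.1.getD i false = false then
    (st.1 + 1, st.2.1.set i true, st.2.2 + 1)
  else st

-- the whole inner for-loop
def passA (s : List Int) (st : Int × List Bool × Int) : Int × List Bool × Int :=
  (List.range s.length).foldl (stepA s) st

-- the while loop; under Pre_ every pass marks at least one box, so fuel len+1 is never exhausted
def loopA (s : List Int) : Nat → List Bool → Int → Int → Int
  | 0, _, _, ans => ans
  | fuel+1, used, usedNum, ans =>
    if usedNum < (used.length : Int) then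
      let st := passA s (0, used, usedNum)
      loopA s fuel st.2.1 st.2.2 (ans + 1)
    else ans

def boxPiles (a : List Int) : Int :=
  let s := PySem.List.sorted a (fun x => x)
  let used := (List.range s.length).map (fun _ => false)
  loopA s (s.length + 1) used 0 0

-- ===== PORT B =====
-- max(((i + v + 1) // (v + 1) for i, v in enumerate(s)), default=0)
def bBound (s : List Int) : Int :=
  PySem.List.maxD
    ((PySem.List.enumerate s).map (fun p => PySem.Int.floordiv (p.1 + p.2 + 1) (p.2 + 1)))
    (fun q => q) 0

def boxPiles_alt (a : List Int) : Int :=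
  bBound (PySem.List.sorted a (fun x => x))

-- ===== PRECONDITION & SPEC =====
-- Pre_ excludes lists containing a negative value: such a box can never be stacked,
-- so A's while loop never terminates (A returns on exactly the inputs in Pre_).
def Pre_boxPiles (a : List Int) : Prop := ∀ x ∈ a, 0 ≤ x
instance (a : List Int) : Decidable (Pre_boxPiles a) := by unfold Pre_boxPiles; infer_instance

def pvWitness_boxPiles : List Int := [2, 0, 1, 1]

def Spec_boxPiles (a : List Int) (out : Int) : Prop := out = boxPiles_alt a
instance (a : List Int) (out : Int) : Decidable (Spec_boxPiles a out) := by unfold Spec_boxPiles; infer_instance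

-- ===== CLAIM (what is proved, stated in full; the proofs are below) =====
def Claim_equal_boxPiles : Prop := ∀ (a : List Int), Dom_boxPiles a → Pre_boxPiles a → Spec_boxPiles a (boxPiles a)

-- ===== LEMMAS AND PROOFS =====

-- list-level model of one greedy pass over the not-yet-used boxes, at current height h
def goPass : Int → List Int → List Int
  | _, [] => []
  | h, x :: t => if h ≤ x then goPass (h+1) t else x :: goPass h t

-- number of elements ≤ v
def cnt (v : Int) (s : List Int) : Int := (s.countP (fun x => decide (x ≤ v)) : Int)

-- the not-yet-used boxes, in order
def maskL : List Int → List Bool → List Int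
  | x :: s, b :: u => if b then maskL s u else x :: maskL s u
  | _, _ => []

-- structural model of the inner for-loop: returns (final height, new used list)
def pass2 : Int → List Int → List Bool → Int × List Bool
  | h, x :: s, b :: u =>
    if h ≤ x ∧ b = false then
      let p := pass2 (h+1) s u
      (p.1, true :: p.2)
    else
      let p := pass2 h s u
      (p.1, b :: p.2)
  | h, _, _ => (h, [])

theorem pass2_cons (h x : Int) (t : List Int) (b : Bool) (u : List Bool) :
    pass2 h (x :: t) (b :: u) =
      if h ≤ x ∧ b = false then ((pass2 (h+1) t u).1, true :: (pass2 (h+1) t u).2)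
      else ((pass2 h t u).1, b :: (pass2 h t u).2) := by
  by_cases hc : h ≤ x ∧ b = false <;> simp [pass2, hc]

theorem maskL_cons (x : Int) (t : List Int) (b : Bool) (u : List Bool) :
    maskL (x :: t) (b :: u) = if b then maskL t u else x :: maskL t u := by
  cases b <;> simp [maskL]

-- pass-counting recursion on the masked list
def ansR : Nat → List Int → Int
  | 0, _ => 0
  | f+1, s => if s.length = 0 then 0 else 1 + ansR f (goPass 0 s)

theorem goPass_sublist (h : Int) (s : List Int) : (goPass h s).Sublist s := by
  induction s generalizing h with
  | nil => simp [goPass]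
  | cons x t ih =>
    simp only [goPass]
    split
    · exact (ih (h+1)).cons x
    · exact (ih h).cons₂ x

theorem cnt_nil (v : Int) : cnt v [] = 0 := rfl

theorem cnt_cons (v x : Int) (t : List Int) :
    cnt v (x :: t) = cnt v t + (if x ≤ v then 1 else 0) := by
  unfold cnt
  rw [List.countP_cons]
  by_cases h : x ≤ v <;> simp [h]

theorem goPass_cons (h x : Int) (t : List Int) :
    goPass h (x :: t) = if h ≤ x then goPass (h+1) t else x :: goPass h t := by
  simp [goPass]

theorem cnt_goPass_le (v h : Int) (s : List Int) : cnt v (goPass h s) ≤ cnt v s := by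
  have h1 : (goPass h s).countP (fun x => decide (x ≤ v)) ≤
      s.countP (fun x => decide (x ≤ v)) := (goPass_sublist h s).countP_le
  simp only [cnt]; exact_mod_cast h1

-- L1: one pass removes at most max(v+1-h,0) boxes of value ≤ v
theorem pass_removes_le (s : List Int) : ∀ (h v : Int),
    cnt v s - cnt v (goPass h s) ≤ max (v + 1 - h) 0 := by
  induction s with
  | nil => intro h v; simp [goPass, cnt_nil]
  | cons x t ih =>
    intro h v
    rw [goPass_cons, cnt_cons]
    by_cases hhx : h ≤ x
    · rw [if_pos hhx]
      have hih := ih (h+1) v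
      by_cases hxv : x ≤ v
      · simp only [if_pos hxv]
        omega
      · simp only [if_neg hxv]
        omega
    · rw [if_neg hhx, cnt_cons]
      have hih := ih h v
      omega

-- L2: if a box of value y survives a pass started at height h, the pass removed
-- at least y+1-h boxes of value ≤ y
theorem pass_removes_ge (s : List Int) : ∀ (h y : Int), s.Pairwise (· ≤ ·) →
    y ∈ goPass h s → y + 1 - h ≤ cnt y s - cnt y (goPass h s) := by
  induction s with
  | nil => intro h y _ hy; simp [goPass] at hy
  | cons x t ih =>
    intro h y hp hy
    rcases List.pairwise_cons.mp hp with ⟨hx, hpt⟩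
    by_cases hhx : h ≤ x
    · rw [goPass_cons, if_pos hhx] at hy ⊢
      have hxy : x ≤ y := hx y ((goPass_sublist (h+1) t).subset hy)
      have hih := ih (h+1) y hpt hy
      rw [cnt_cons]
      simp only [if_pos hxy]
      omega
    · rw [goPass_cons, if_neg hhx] at hy ⊢
      rcases List.mem_cons.mp hy with rfl | hy'
      · have h1 := cnt_goPass_le y h t
        rw [cnt_cons, cnt_cons]
        simp only [le_refl, if_pos]
        omega
      · have hxy : x ≤ y := hx y ((goPass_sublist h t).subset hy')
        have hih := ih h y hpt hy'
        rw [cnt_cons, cnt_cons]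
        simp only [if_pos hxy]
        omega

theorem goPass_pairwise (h : Int) (s : List Int) (hp : s.Pairwise (· ≤ ·)) :
    (goPass h s).Pairwise (· ≤ ·) := hp.sublist (goPass_sublist h s)

theorem goPass_mem {h y : Int} {s : List Int} (hy : y ∈ goPass h s) : y ∈ s :=
  (goPass_sublist h s).subset hy

theorem goPass_length_le (h : Int) (s : List Int) : (goPass h s).length ≤ s.length :=
  (goPass_sublist h s).length_le

theorem goPass_progress (x : Int) (t : List Int) (hx : 0 ≤ x) :
    (goPass 0 (x :: t)).length < (x :: t).length := by
  simp only [goPass, if_pos hx, List.length_cons]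
  exact Nat.lt_succ_of_le (goPass_length_le 1 t)

-- sorted prefix counting: position i sees at least i+1 boxes of value ≤ s[i]
theorem cnt_index (s : List Int) (hp : s.Pairwise (· ≤ ·)) (i : Nat) (hi : i < s.length) :
    (i : Int) + 1 ≤ cnt (s[i]) s := by
  have hmono := List.pairwise_iff_getElem.mp hp
  have hsplit : s = s.take (i+1) ++ s.drop (i+1) := (List.take_append_drop _ _).symm
  have hlen : (s.take (i+1)).length = i + 1 := by
    rw [List.length_take]; omega
  have htake : (s.take (i+1)).countP (fun x => decide (x ≤ s[i])) = i + 1 := by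
    rw [List.countP_eq_length.mpr, hlen]
    intro x hx
    rcases List.mem_iff_getElem.mp hx with ⟨j, hj, rfl⟩
    have hj' : j < i + 1 := by rw [hlen] at hj; exact hj
    rw [List.getElem_take]
    rcases Nat.lt_or_ge j i with hji | hji
    · exact decide_eq_true (hmono j i (by omega) hi hji)
    · have : j = i := by omega
      subst this; simp
  have hsum := congrArg (List.countP (fun x => decide (x ≤ s[i]))) hsplit
  rw [List.countP_append] at hsum
  simp only [cnt]
  omega

-- sorted converse: if at least k+1 boxes are ≤ v then s[k] ≤ v
theorem index_cnt (s : List Int) (hp : s.Pairwise (· ≤ ·)) (v : Int) (k : Nat)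
    (hk : k < s.length) (hc : (k : Int) + 1 ≤ cnt v s) : s[k] ≤ v := by
  by_contra hv
  push Not at hv
  have hmono := List.pairwise_iff_getElem.mp hp
  have hsplit : s = s.take k ++ s.drop k := (List.take_append_drop _ _).symm
  have hdrop : (s.drop k).countP (fun x => decide (x ≤ v)) = 0 := by
    rw [List.countP_eq_zero]
    intro x hx
    rcases List.mem_iff_getElem.mp hx with ⟨j, hj, rfl⟩
    rw [List.getElem_drop]
    have hkj : k + j < s.length := by
      rw [List.length_drop] at hj; omega
    have hle : s[k] ≤ s[k+j] := by
      rcases Nat.eq_or_lt_of_le (Nat.le_add_right k j) with he | hlt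
      · simp [← he]
      · exact hmono k (k+j) hk hkj hlt
    simp only [decide_eq_true_eq]
    omega
  have htake : (s.take k).countP (fun x => decide (x ≤ v)) ≤ k := by
    calc (s.take k).countP (fun x => decide (x ≤ v)) ≤ (s.take k).length :=
          List.countP_le_length
      _ ≤ k := by rw [List.length_take]; omega
  have hsum := congrArg (List.countP (fun x => decide (x ≤ v))) hsplit
  rw [List.countP_append] at hsum
  simp only [cnt] at hc
  omega

-- ceiling-quotient facts
theorem q_mul_ge (i x : Int) (hx : 0 ≤ x) :
    i + 1 ≤ PySem.Int.floordiv (i + x + 1) (x + 1) * (x + 1) := by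
  have h1 := PySem.Int.floordiv_mul_add_mod (i + x + 1) (x + 1)
  have h2 := PySem.Int.mod_nonneg (a := i + x + 1) (b := x + 1) (by omega)
  have h3 := PySem.Int.mod_lt (a := i + x + 1) (b := x + 1) (by omega)
  linarith

theorem q_le_of (i x K : Int) (hx : 0 ≤ x) (h : i + 1 ≤ K * (x + 1)) :
    PySem.Int.floordiv (i + x + 1) (x + 1) ≤ K := by
  have : PySem.Int.floordiv (i + x + 1) (x + 1) < K + 1 := by
    rw [PySem.Int.floordiv_lt_iff_lt_mul (by omega)]
    nlinarith
  omega

theorem q_pos (i x : Int) (hx : 0 ≤ x) (hi : 0 ≤ i) :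
    1 ≤ PySem.Int.floordiv (i + x + 1) (x + 1) := by
  have := q_mul_ge i x hx
  nlinarith [PySem.Int.floordiv_mul_add_mod (i + x + 1) (x + 1)]

-- characterisation of bBound on a nonempty list
theorem bBound_nil : bBound [] = 0 := by decide

theorem bBound_spec (s : List Int) (hne : s ≠ []) :
    (∀ (i : Nat) (hi : i < s.length),
        PySem.Int.floordiv ((i : Int) + s[i] + 1) (s[i] + 1) ≤ bBound s) ∧
    (∃ (i : Nat) (hi : i < s.length),
        bBound s = PySem.Int.floordiv ((i : Int) + s[i] + 1) (s[i] + 1)) := by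
  set qs := (PySem.List.enumerate s).map
      (fun p => PySem.Int.floordiv (p.1 + p.2 + 1) (p.2 + 1)) with hqs
  have hqne : qs ≠ [] := by
    intro hq
    apply hne
    have := congrArg List.length hq
    simpa [hqs, PySem.List.length_enumerate] using this
  rcases hmax : PySem.List.max? qs (fun q => q) with _ | m
  · exact absurd ((PySem.List.max?_eq_none_iff qs (fun q => q)).mp hmax) hqne
  · have hb : bBound s = m := by
      simp [bBound, PySem.List.maxD, ← hqs, hmax]
    constructor
    · intro i hi
      have hmem : PySem.Int.floordiv ((i : Int) + s[i] + 1) (s[i] + 1) ∈ qs := by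
        rw [hqs]
        refine List.mem_map.mpr ⟨((i : Int), s[i]), ?_, rfl⟩
        exact (PySem.List.mem_enumerate_iff s 0 _).mpr ⟨i, hi, by simp⟩
      have := PySem.List.max?_isMax hmax _ hmem
      rw [hb]; exact this
    · have hmmem : m ∈ qs := PySem.List.max?_mem hmax
      rw [hqs] at hmmem
      rcases List.mem_map.mp hmmem with ⟨p, hp, hpq⟩
      rcases (PySem.List.mem_enumerate_iff s 0 p).mp hp with ⟨k, hk, rfl⟩
      exact ⟨k, hk, by rw [hb, ← hpq]; simp⟩

theorem bBound_feas (s : List Int) (hnn : ∀ x ∈ s, 0 ≤ x) (i : Nat) (hi : i < s.length) :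
    (i : Int) + 1 ≤ bBound s * (s[i] + 1) := by
  have hne : s ≠ [] := by intro h; subst h; simp at hi
  have hx : 0 ≤ s[i] := hnn _ (s.getElem_mem hi)
  have h1 := (bBound_spec s hne).1 i hi
  have h2 := q_mul_ge (i : Int) (s[i]) hx
  nlinarith

theorem bBound_le (s : List Int) (hnn : ∀ x ∈ s, 0 ≤ x) (hne : s ≠ []) (K : Int)
    (h : ∀ (i : Nat) (hi : i < s.length), (i : Int) + 1 ≤ K * (s[i] + 1)) :
    bBound s ≤ K := by
  rcases (bBound_spec s hne).2 with ⟨i, hi, hb⟩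
  rw [hb]
  exact q_le_of _ _ _ (hnn _ (s.getElem_mem hi)) (h i hi)

theorem bBound_pos (s : List Int) (hnn : ∀ x ∈ s, 0 ≤ x) (hne : s ≠ []) : 1 ≤ bBound s := by
  have h0 : 0 < s.length := List.length_pos_iff.mpr hne
  have h1 := (bBound_spec s hne).1 0 h0
  have h2 := q_pos 0 (s[0]) (hnn _ (s.getElem_mem h0)) le_rfl
  push_cast at h1
  omega

theorem bBound_nonneg (s : List Int) (hnn : ∀ x ∈ s, 0 ≤ x) : 0 ≤ bBound s := by
  rcases eq_or_ne s [] with rfl | hne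
  · rw [bBound_nil]
  · have := bBound_pos s hnn hne; omega

-- index-form feasibility to count-form feasibility
theorem cnt_le_of_feas (s : List Int) (hp : s.Pairwise (· ≤ ·)) (K : Int) (hK : 0 ≤ K)
    (h : ∀ (i : Nat) (hi : i < s.length), (i : Int) + 1 ≤ K * (s[i] + 1))
    (v : Int) (hv : 0 ≤ v) : cnt v s ≤ K * (v + 1) := by
  rcases Nat.eq_zero_or_pos (s.countP (fun x => decide (x ≤ v))) with hm | hm
  · have : cnt v s = 0 := by simp [cnt, hm]
    rw [this]
    positivity
  · set m := s.countP (fun x => decide (x ≤ v)) with hmdef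
    have hms : m ≤ s.length := List.countP_le_length
    have hmlt : m - 1 < s.length := by omega
    have hsm : s[m-1] ≤ v := by
      apply index_cnt s hp v (m-1) hmlt
      simp only [cnt, ← hmdef]
      omega
    have hfe := h (m-1) hmlt
    have : (m : Int) ≤ K * (s[m-1] + 1) := by
      have : ((m - 1 : Nat) : Int) + 1 = (m : Int) := by omega
      omega
    have hmono : K * (s[m-1] + 1) ≤ K * (v + 1) :=
      mul_le_mul_of_nonneg_left (by omega) hK
    simp only [cnt, ← hmdef]
    omega

-- the main induction: the greedy pass recursion computes the closed form
theorem ansR_eq_bBound : ∀ (f : Nat) (s : List Int), s.Pairwise (· ≤ ·) →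
    (∀ x ∈ s, 0 ≤ x) → s.length ≤ f → ansR f s = bBound s := by
  intro f
  induction f with
  | zero =>
    intro s _ _ hlen
    have : s = [] := List.eq_nil_of_length_eq_zero (Nat.le_zero.mp hlen)
    subst this
    rw [bBound_nil]; rfl
  | succ f ih =>
    intro s hp hnn hlen
    rcases s with _ | ⟨x, t⟩
    · rw [bBound_nil]; rfl
    set s := x :: t
    have hne : s ≠ [] := by simp [s]
    have hx0 : 0 ≤ x := hnn x (by simp [s])
    set s' := goPass 0 s with hs'
    have hp' : s'.Pairwise (· ≤ ·) := goPass_pairwise 0 s hp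
    have hnn' : ∀ y ∈ s', 0 ≤ y := fun y hy => hnn y (goPass_mem hy)
    have hlen' : s'.length ≤ f := by
      have := goPass_progress x t hx0
      simp only [s, ← hs'] at *
      omega
    have hrec : ansR (f+1) s = 1 + ansR f s' := by
      simp only [hs']
      simp [ansR, s]
    rw [hrec, ih s' hp' hnn' hlen']
    set k := bBound s with hk
    have hk1 : 1 ≤ k := bBound_pos s hnn hne
    have hcnt : ∀ v, 0 ≤ v → cnt v s ≤ k * (v + 1) :=
      cnt_le_of_feas s hp k (by omega) (bBound_feas s hnn)
    -- bBound s' ≤ k - 1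
    have hub : bBound s' ≤ k - 1 := by
      rcases eq_or_ne s' [] with h0 | hne'
      · rw [h0, bBound_nil]; omega
      · apply bBound_le s' hnn' hne' (k-1)
        intro j hj
        set y := s'[j] with hy
        have hymem : y ∈ s' := s'.getElem_mem hj
        have hy0 : 0 ≤ y := hnn' y hymem
        have h1 : (j : Int) + 1 ≤ cnt y s' := cnt_index s' hp' j hj
        have h2 : y + 1 - 0 ≤ cnt y s - cnt y s' := pass_removes_ge s 0 y hp hymem
        have h3 : cnt y s ≤ k * (y + 1) := hcnt y hy0
        nlinarith
    -- k ≤ bBound s' + 1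
    have hlb : k ≤ bBound s' + 1 := by
      apply bBound_le s hnn hne (bBound s' + 1)
      intro i hi
      set v := s[i] with hv
      have hv0 : 0 ≤ v := hnn v (s.getElem_mem hi)
      have h1 : (i : Int) + 1 ≤ cnt v s := cnt_index s hp i hi
      have h2 : cnt v s - cnt v s' ≤ max (v + 1 - 0) 0 := pass_removes_le s 0 v
      have h3 : cnt v s' ≤ bBound s' * (v + 1) := by
        apply cnt_le_of_feas s' hp' (bBound s') (bBound_nonneg s' hnn') (bBound_feas s' hnn') v hv0
      have hmax : max (v + 1 - 0) 0 = v + 1 := by omega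
      nlinarith [hmax]
    omega

-- ===== simulation of the array-based A by the list-based recursion =====

theorem maskL_length_le : ∀ (s : List Int) (u : List Bool), (maskL s u).length ≤ s.length := by
  intro s
  induction s with
  | nil => intro u; simp [maskL]
  | cons x t ih =>
    intro u
    rcases u with _ | ⟨b, u'⟩
    · simp [maskL]
    · simp only [maskL]
      split
      · exact le_trans (ih u') (by simp)
      · simpa using ih u'

theorem maskL_replicate : ∀ (s : List Int), maskL s (List.replicate s.length false) = s := by
  intro s
  induction s with
  | nil => rfl
  | cons x t ih => simp [maskL, List.replicate, ih]

-- lifting the inner fold over one cons of the state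
theorem foldl_stepA_lift (x : Int) (t : List Int) (c : Bool) :
    ∀ (l : List Nat) (st : Int × List Bool × Int),
      l.foldl (fun st i => stepA (x :: t) st (i + 1)) (st.1, c :: st.2.1, st.2.2) =
      ((l.foldl (stepA t) st).1, c :: (l.foldl (stepA t) st).2.1, (l.foldl (stepA t) st).2.2) := by
  intro l
  induction l with
  | nil => intro st; rfl
  | cons i l ih =>
    intro st
    have hstep : stepA (x :: t) (st.1, c :: st.2.1, st.2.2) (i + 1) =
        ((stepA t st i).1, c :: (stepA t st i).2.1, (stepA t st i).2.2) := by
      simp only [stepA, List.getD_cons_succ, List.set_cons_succ]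
      split <;> rfl
    simp only [List.foldl_cons, hstep]
    exact ih (stepA t st i)

theorem passA_eq_pass2 : ∀ (s : List Int) (u : List Bool), u.length = s.length →
    ∀ (h un : Int),
      passA s (h, u, un) =
        ((pass2 h s u).1, (pass2 h s u).2, un + ((pass2 h s u).1 - h)) := by
  intro s
  induction s with
  | nil =>
    intro u hu h un
    have : u = [] := List.eq_nil_of_length_eq_zero hu
    subst this
    simp [passA, pass2]
  | cons x t ih =>
    intro u hu h un
    rcases u with _ | ⟨b, u'⟩
    · simp at hu
    · have hu' : u'.length = t.length := by simpa using hu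
      simp only [passA, List.length_cons, List.range_succ_eq_map, List.foldl_cons,
        List.foldl_map]
      have hstep0 : stepA (x :: t) (h, b :: u', un) 0 =
          if x ≥ h ∧ b = false then (h + 1, true :: u', un + 1) else (h, b :: u', un) := by
        simp [stepA]
      rw [hstep0]
      by_cases hc : x ≥ h ∧ b = false
      · rw [if_pos hc]
        have hl := foldl_stepA_lift x t true (List.range t.length) (h + 1, u', un + 1)
        simp only [hl]
        have hIH := ih u' hu' (h + 1) (un + 1)
        simp only [passA] at hIH
        rw [hIH]
        have hcond : h ≤ x ∧ b = false := ⟨hc.1, hc.2⟩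
        rw [pass2_cons, if_pos hcond]
        simp only [Prod.mk.injEq, true_and]
        omega
      · rw [if_neg hc]
        have hl := foldl_stepA_lift x t b (List.range t.length) (h, u', un)
        simp only [hl]
        have hIH := ih u' hu' h un
        simp only [passA] at hIH
        rw [hIH]
        have hcond : ¬ (h ≤ x ∧ b = false) := hc
        rw [pass2_cons, if_neg hcond]

theorem pass2_length : ∀ (s : List Int) (u : List Bool) (h : Int), u.length = s.length →
    (pass2 h s u).2.length = u.length := by
  intro s
  induction s with
  | nil =>
    intro u h hu
    have : u = [] := List.eq_nil_of_length_eq_zero hu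
    subst this; rfl
  | cons x t ih =>
    intro u h hu
    rcases u with _ | ⟨b, u'⟩
    · simp at hu
    · have hu' : u'.length = t.length := by simpa using hu
      rw [pass2_cons]
      split <;> simp [ih u' _ hu']

theorem maskL_pass2 : ∀ (s : List Int) (u : List Bool) (h : Int), u.length = s.length →
    maskL s (pass2 h s u).2 = goPass h (maskL s u) := by
  intro s
  induction s with
  | nil => intro u h _; rfl
  | cons x t ih =>
    intro u h hu
    rcases u with _ | ⟨b, u'⟩
    · simp at hu
    · have hu' : u'.length = t.length := by simpa using hu
      rw [pass2_cons, maskL_cons]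
      rcases b with _ | _
      · by_cases hx : h ≤ x
        · rw [if_pos ⟨hx, rfl⟩, if_neg (by simp : ¬ (false = true))]
          rw [maskL_cons, if_pos rfl, goPass_cons, if_pos hx]
          exact ih u' (h+1) hu'
        · rw [if_neg (by simp [hx]), if_neg (by simp : ¬ (false = true))]
          rw [maskL_cons, if_neg (by simp : ¬ (false = true)), goPass_cons, if_neg hx]
          rw [ih u' h hu']
      · rw [if_neg (by simp), if_pos rfl, maskL_cons, if_pos rfl]
        exact ih u' h hu'

theorem height_pass2 : ∀ (s : List Int) (u : List Bool) (h : Int), u.length = s.length →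
    (pass2 h s u).1 + ((maskL s (pass2 h s u).2).length : Int) =
      h + ((maskL s u).length : Int) := by
  intro s
  induction s with
  | nil => intro u h _; rfl
  | cons x t ih =>
    intro u h hu
    rcases u with _ | ⟨b, u'⟩
    · simp at hu
    · have hu' : u'.length = t.length := by simpa using hu
      rw [pass2_cons, maskL_cons]
      rcases b with _ | _
      · by_cases hx : h ≤ x
        · rw [if_pos ⟨hx, rfl⟩, if_neg (by simp : ¬ (false = true))]
          rw [maskL_cons, if_pos rfl]
          have := ih u' (h+1) hu'
          simp only [List.length_cons]
          push_cast
          omega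
        · rw [if_neg (by simp [hx]), if_neg (by simp : ¬ (false = true))]
          rw [maskL_cons, if_neg (by simp : ¬ (false = true))]
          have := ih u' h hu'
          simp only [List.length_cons]
          push_cast
          omega
      · rw [if_neg (by simp), if_pos rfl, maskL_cons, if_pos rfl]
        exact ih u' h hu'

theorem loopA_eq_ansR : ∀ (fuel : Nat) (s : List Int) (u : List Bool) (un ans : Int),
    u.length = s.length →
    un + ((maskL s u).length : Int) = (s.length : Int) →
    loopA s fuel u un ans = ans + ansR fuel (maskL s u) := by
  intro fuel
  induction fuel with
  | zero => intro s u un ans _ _; simp [loopA, ansR]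
  | succ fuel ih =>
    intro s u un ans hu hun
    have hmle := maskL_length_le s u
    by_cases hcond : un < (u.length : Int)
    · have hmne : ¬ ((maskL s u).length = 0) := by
        rw [hu] at hcond
        omega
      simp only [loopA, if_pos hcond]
      rw [passA_eq_pass2 s u hu 0 un]
      have hu2 : (pass2 0 s u).2.length = s.length := by
        rw [pass2_length s u 0 hu, hu]
      have hmask := maskL_pass2 s u 0 hu
      have hh := height_pass2 s u 0 hu
      have hun2 : (un + ((pass2 0 s u).1 - 0)) + ((maskL s (pass2 0 s u).2).length : Int)
          = (s.length : Int) := by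
        omega
      rw [ih s (pass2 0 s u).2 _ (ans + 1) hu2 hun2, hmask]
      have : ansR (fuel+1) (maskL s u) = 1 + ansR fuel (goPass 0 (maskL s u)) := by
        simp [ansR, hmne]
      rw [this]
      ring
    · simp only [loopA, if_neg hcond]
      have hm0 : (maskL s u).length = 0 := by
        rw [hu] at hcond
        omega
      have : maskL s u = [] := List.eq_nil_of_length_eq_zero hm0
      rw [this]
      simp [ansR]

-- A's port computes the pass recursion on the sorted list
theorem boxPiles_eq_ansR (a : List Int) :
    boxPiles a = ansR ((PySem.List.sorted a (fun x => x)).length + 1)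
      (PySem.List.sorted a (fun x => x)) := by
  set s := PySem.List.sorted a (fun x => x) with hs
  have hrepl : (List.range s.length).map (fun _ => false) = List.replicate s.length false := by
    rw [List.map_const']
    simp
  show loopA s (s.length + 1) ((List.range s.length).map (fun _ => false)) 0 0 = _
  rw [hrepl]
  have hu : (List.replicate s.length false).length = s.length := by simp
  have hmask := maskL_replicate s
  have hun : (0 : Int) + ((maskL s (List.replicate s.length false)).length : Int)
      = (s.length : Int) := by
    rw [hmask]; omega
  rw [loopA_eq_ansR (s.length + 1) s _ 0 0 hu hun, hmask]
  omega

-- ===== VERDICT (by name: the statement is the Claim_ definition above) =====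
theorem boxPiles_spec : Claim_equal_boxPiles := by
  intro a _ hpre
  unfold Spec_boxPiles
  set s := PySem.List.sorted a (fun x => x) with hs
  have hp : s.Pairwise (· ≤ ·) := PySem.List.sorted_pairwise a (fun x => x)
  have hnn : ∀ x ∈ s, 0 ≤ x := fun x hx =>
    hpre x ((PySem.List.mem_sorted a (fun y => y) false x).mp hx)
  rw [boxPiles_eq_ansR a]
  show ansR (s.length + 1) s = boxPiles_alt a
  rw [ansR_eq_bBound (s.length + 1) s hp hnn (by omega)]
  rfl
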